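-- pv_equiv track=rewrite | github.com/2025-Graduation-Design/Server | app/crawling/melonCrawler.py | _group_lyrics_by_length
-- ===== SOURCE A (Python) =====
-- def _group_lyrics_by_length(lyrics_list, base_line=2, min_length=25):
--     """가사를 base_line개 줄로 묶고, 25자 이상 될 때까지 추가하는 함수"""
--     grouped = []
--     i = 0
--     while i < len(lyrics_list):
--         chunk_lines = lyrics_list[i:i+base_line]
--         chunk_text = " ".join(chunk_lines)
--         j = i + base_line
--         while len(chunk_text.replace("\n", "")) < min_length and j < len(lyrics_list):
--             chunk_text += " " + lyrics_list[j]
--             j += 1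
--         grouped.append(chunk_text.strip())
--         i = j
--     return grouped
-- ===== SOURCE B (Python) =====
-- def _group_lyrics_by_length(lyrics_list, base_line=2, min_length=25):
--     """Single flat pass: grow `current`; flush once it has >= base_line lines and enough text."""
--     grouped = []
--     current = []
--     for line in lyrics_list:
--         current.append(line)
--         if len(current) >= base_line and len(" ".join(current).replace("\n", "")) >= min_length:
--             grouped.append(" ".join(current).strip())
--             current = []
--     if current:
--         grouped.append(" ".join(current).strip())
--     return grouped
-- ===== Notes on version B (the rewrite author's own statement) =====
-- stated objective: simpler
-- what changed: Replaces A's nested while-loops over indices (slice a base chunk, then an inner loop that keeps appending lines by index until the length bound) by one flat pass that appends each line to a running buffer and flushes it as soon as it holds at least base_line lines and enough text, with a tail flush after the loop.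
-- outside the precondition, e.g. on _group_lyrics_by_length(['ab', 'cd'], 0, 3): A returns ['ab', 'cd'], B returns ['ab cd']
import Mathlib
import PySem

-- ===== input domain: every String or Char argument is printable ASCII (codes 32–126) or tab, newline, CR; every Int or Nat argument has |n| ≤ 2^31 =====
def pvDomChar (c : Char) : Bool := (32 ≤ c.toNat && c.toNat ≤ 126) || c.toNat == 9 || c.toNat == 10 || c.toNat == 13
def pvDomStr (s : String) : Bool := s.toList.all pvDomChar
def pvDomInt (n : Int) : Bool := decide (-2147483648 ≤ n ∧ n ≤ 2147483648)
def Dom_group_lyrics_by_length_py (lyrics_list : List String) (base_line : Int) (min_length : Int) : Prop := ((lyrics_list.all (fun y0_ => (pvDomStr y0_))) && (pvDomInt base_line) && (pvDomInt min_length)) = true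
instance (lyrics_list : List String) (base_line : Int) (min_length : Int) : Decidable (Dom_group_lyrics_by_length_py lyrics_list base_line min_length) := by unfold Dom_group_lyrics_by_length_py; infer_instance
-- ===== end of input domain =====

-- B replaces A's nested index-based while-loops (slice a base chunk, extend it by index) with one
-- flat pass over the lines keeping a running buffer that is flushed when full enough (objective: simpler).

-- ===== PORT A =====
-- inner 'while len(chunk_text.replace("\n","")) < min_length and j < len(lyrics_list):' loop
def pvInnerA (L : List String) (min_length : Int) (t : String) (j : Int) : String × Int :=
  if h : PySem.Str.len (PySem.Str.replace t "\n" "") < min_length ∧ j < PySem.List.len L then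
    pvInnerA L min_length (t ++ " " ++ PySem.List.pyGetD L j "") (j + 1)
  else (t, j)
termination_by (PySem.List.len L - j).toNat
decreasing_by simp only [PySem.List.len_eq] at *; omega

-- outer 'while i < len(lyrics_list):' loop; fuel only makes the recursion total
-- (under Pre_ the loop runs at most len(lyrics_list) times, so the fuel never runs out)
def pvOuterA (L : List String) (base_line min_length : Int) : Nat → Int → List String → List String
  | 0, _, acc => acc
  | Nat.succ fuel, i, acc =>
    if i < PySem.List.len L then
      let chunk_lines := PySem.List.slice L (some i) (some (i + base_line))
      let chunk_text := PySem.Str.join " " chunk_lines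
      let p := pvInnerA L min_length chunk_text (i + base_line)
      pvOuterA L base_line min_length fuel p.2 (acc ++ [PySem.Str.strip p.1])
    else acc

def group_lyrics_by_length_py (lyrics_list : List String) (base_line : Int) (min_length : Int) : List String :=
  pvOuterA lyrics_list base_line min_length (lyrics_list.length + 1) 0 []

-- ===== PORT B =====
-- one step of B's flat loop: append the line to the running buffer, flush it when full enough
def pvStepB (base_line min_length : Int) (st : List String × List String) (line : String) : List String × List String :=
  let cur := st.2 ++ [line]
  if base_line ≤ (cur.length : Int) ∧
      min_length ≤ PySem.Str.len (PySem.Str.replace (PySem.Str.join " " cur) "\n" "") then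
    (st.1 ++ [PySem.Str.strip (PySem.Str.join " " cur)], [])
  else (st.1, cur)

def group_lyrics_by_length_py_alt (lyrics_list : List String) (base_line : Int) (min_length : Int) : List String :=
  let st := lyrics_list.foldl (pvStepB base_line min_length) ([], [])
  if st.2.isEmpty then st.1 else st.1 ++ [PySem.Str.strip (PySem.Str.join " " st.2)]

-- ===== PRECONDITION & SPEC =====
-- Pre_ keeps the natural domain base_line ≥ 1: for base_line ≤ 0 (a malformed chunk size) A's chunking
-- is an accident of empty slices / negative indexing and A can even loop forever (e.g. base_line = 0,
-- min_length ≤ 0) or raise IndexError; B's flat pass behaves sensibly there instead.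
def Pre_group_lyrics_by_length_py (lyrics_list : List String) (base_line : Int) (min_length : Int) : Prop :=
  1 ≤ base_line
instance (lyrics_list : List String) (base_line : Int) (min_length : Int) : Decidable (Pre_group_lyrics_by_length_py lyrics_list base_line min_length) := by unfold Pre_group_lyrics_by_length_py; infer_instance

def pvWitness_group_lyrics_by_length_py : List String × Int × Int := (["hello", "world"], 2, 5)

def Spec_group_lyrics_by_length_py (lyrics_list : List String) (base_line : Int) (min_length : Int) (out : List String) : Prop := out = group_lyrics_by_length_py_alt lyrics_list base_line min_length
instance (lyrics_list : List String) (base_line : Int) (min_length : Int) (out : List String) : Decidable (Spec_group_lyrics_by_length_py lyrics_list base_line min_length out) := by unfold Spec_group_lyrics_by_length_py; infer_instance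

-- ===== CLAIM (what is proved, stated in full; the proofs are below) =====
def Claim_equal_group_lyrics_by_length_py : Prop := ∀ (lyrics_list : List String) (base_line : Int) (min_length : Int), Dom_group_lyrics_by_length_py lyrics_list base_line min_length → Pre_group_lyrics_by_length_py lyrics_list base_line min_length → Spec_group_lyrics_by_length_py lyrics_list base_line min_length (group_lyrics_by_length_py lyrics_list base_line min_length)

-- ===== LEMMAS AND PROOFS =====

-- B's fold followed by the tail flush, from an arbitrary state (proof-side view of port B)
def pvFinish (base_line min_length : Int) (xs : List String) (st : List String × List String) : List String :=
  let r := xs.foldl (pvStepB base_line min_length) st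
  if r.2.isEmpty then r.1 else r.1 ++ [PySem.Str.strip (PySem.Str.join " " r.2)]

theorem pv_alt_eq_finish (L : List String) (bl ml : Int) :
    group_lyrics_by_length_py_alt L bl ml = pvFinish bl ml L ([], []) := rfl

theorem pv_finish_cons (bl ml : Int) (y : String) (ys : List String) (st : List String × List String) :
    pvFinish bl ml (y :: ys) st = pvFinish bl ml ys (pvStepB bl ml st y) := rfl

theorem pv_chars_join_append_singleton (sep y : List Char) :
    ∀ (cur : List (List Char)), cur ≠ [] →
    PySem.Chars.join sep (cur ++ [y]) = PySem.Chars.join sep cur ++ sep ++ y := by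
  intro cur
  induction cur with
  | nil => intro h; exact absurd rfl h
  | cons a rest ih =>
    intro _
    cases rest with
    | nil =>
      simp [PySem.Chars.join_cons_cons, PySem.Chars.join_singleton, List.append_assoc]
    | cons b r =>
      have h2 := ih (by simp)
      rw [List.cons_append] at h2
      rw [List.cons_append, List.cons_append, PySem.Chars.join_cons_cons,
        PySem.Chars.join_cons_cons, h2]
      simp [List.append_assoc]

-- " ".join(cur + [y]) = " ".join(cur) + " " + y for nonempty cur
theorem pv_join_append_singleton (y : String) (cur : List String) (h : cur ≠ []) :
    PySem.Str.join " " (cur ++ [y]) = PySem.Str.join " " cur ++ " " ++ y := by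
  apply String.toList_inj.mp
  simp only [PySem.Str.toList_join, String.toList_append, List.map_append, List.map_cons,
    List.map_nil]
  exact pv_chars_join_append_singleton " ".toList y.toList (cur.map String.toList)
    (by simpa using h)

-- while the buffer stays strictly below base_line lines, B's fold only accumulates
theorem pv_fill_short (bl ml : Int) (b : Nat) (hb : bl = (b : Int)) :
    ∀ (xs cur acc : List String), cur.length + xs.length < b →
    List.foldl (pvStepB bl ml) (acc, cur) xs = (acc, cur ++ xs) := by
  intro xs
  induction xs with
  | nil => intro cur acc _; simp
  | cons y ys ih =>
    intro cur acc h
    have h' : cur.length + 1 + ys.length < b := by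
      simp only [List.length_cons] at h; omega
    simp only [List.foldl_cons]
    have hcond : ¬ (bl ≤ ((cur ++ [y]).length : Int) ∧
        ml ≤ PySem.Str.len (PySem.Str.replace (PySem.Str.join " " (cur ++ [y])) "\n" "")) := by
      rintro ⟨h1, -⟩
      rw [hb] at h1
      simp only [List.length_append, List.length_cons, List.length_nil] at h1
      omega
    rw [show pvStepB bl ml (acc, cur) y = (acc, cur ++ [y]) from by
      simp only [pvStepB, if_neg hcond]]
    rw [ih (cur ++ [y]) acc (by
      simp only [List.length_append, List.length_cons, List.length_nil]; omega)]
    simp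

-- filling the buffer up to exactly base_line lines: the first flush check happens there
theorem pv_fill (bl ml : Int) (b : Nat) (hb : bl = (b : Int)) :
    ∀ (ys cur : List String), cur.length < b → cur.length + ys.length = b →
    ∀ (zs acc : List String),
    List.foldl (pvStepB bl ml) (acc, cur) (ys ++ zs) =
      if ml ≤ PySem.Str.len (PySem.Str.replace (PySem.Str.join " " (cur ++ ys)) "\n" "") then
        List.foldl (pvStepB bl ml) (acc ++ [PySem.Str.strip (PySem.Str.join " " (cur ++ ys))], []) zs
      else
        List.foldl (pvStepB bl ml) (acc, cur ++ ys) zs := by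
  intro ys
  induction ys with
  | nil =>
    intro cur h1 h2
    simp only [List.length_nil] at h2
    omega
  | cons y ys ih =>
    intro cur h1 h2 zs acc
    simp only [List.cons_append, List.foldl_cons]
    by_cases hy : ys = []
    · subst hy
      simp only [List.length_cons, List.length_nil] at h2
      have hlen : bl ≤ ((cur ++ [y]).length : Int) := by
        rw [hb]
        simp only [List.length_append, List.length_cons, List.length_nil]
        omega
      by_cases hm : ml ≤ PySem.Str.len (PySem.Str.replace (PySem.Str.join " " (cur ++ [y])) "\n" "")
      · rw [show pvStepB bl ml (acc, cur) y =
          (acc ++ [PySem.Str.strip (PySem.Str.join " " (cur ++ [y]))], []) from by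
            simp only [pvStepB, if_pos (And.intro hlen hm)]]
        simp only [List.nil_append, if_pos hm]
      · rw [show pvStepB bl ml (acc, cur) y = (acc, cur ++ [y]) from by
          simp only [pvStepB]
          rw [if_neg]
          rintro ⟨-, hc⟩
          exact hm hc]
        simp only [List.nil_append, if_neg hm]
    · have hys : 0 < ys.length := by
        cases ys with
        | nil => exact absurd rfl hy
        | cons _ _ => simp
      simp only [List.length_cons] at h2
      have hcond : ¬ (bl ≤ ((cur ++ [y]).length : Int) ∧
          ml ≤ PySem.Str.len (PySem.Str.replace (PySem.Str.join " " (cur ++ [y])) "\n" "")) := by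
        rintro ⟨hc, -⟩
        rw [hb] at hc
        simp only [List.length_append, List.length_cons, List.length_nil] at hc
        omega
      rw [show pvStepB bl ml (acc, cur) y = (acc, cur ++ [y]) from by
        simp only [pvStepB, if_neg hcond]]
      rw [ih (cur ++ [y]) (by
          simp only [List.length_append, List.length_cons, List.length_nil]; omega)
        (by simp only [List.length_append, List.length_cons, List.length_nil]; omega) zs acc]
      simp [List.append_assoc]

-- the extension phase: A's inner while-loop corresponds step for step to B's fold
-- (buffer already has >= base_line lines but not enough text)
theorem pv_ext (bl ml : Int) (b : Nat) (hb : bl = (b : Int)) (L : List String) :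
    ∀ (xs cur acc : List String) (j : Nat), xs = L.drop j → j ≤ L.length →
    cur ≠ [] → b ≤ cur.length →
    PySem.Str.len (PySem.Str.replace (PySem.Str.join " " cur) "\n" "") < ml →
    ((j : Int) ≤ (pvInnerA L ml (PySem.Str.join " " cur) (j : Int)).2 ∧
      (pvInnerA L ml (PySem.Str.join " " cur) (j : Int)).2 ≤ (L.length : Int)) ∧
    pvFinish bl ml xs (acc, cur) =
      pvFinish bl ml (L.drop ((pvInnerA L ml (PySem.Str.join " " cur) (j : Int)).2).toNat)
        (acc ++ [PySem.Str.strip (pvInnerA L ml (PySem.Str.join " " cur) (j : Int)).1], []) := by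
  intro xs
  induction xs with
  | nil =>
    intro cur acc j hxs hj hne hlen hm
    have hjn : j = L.length := by
      have := congrArg List.length hxs
      simp only [List.length_drop, List.length_nil] at this
      omega
    have hstop : pvInnerA L ml (PySem.Str.join " " cur) (j : Int) =
        (PySem.Str.join " " cur, (j : Int)) := by
      rw [pvInnerA]
      rw [dif_neg]
      rintro ⟨-, hlt⟩
      rw [PySem.List.len_eq] at hlt
      omega
    rw [hstop]
    refine ⟨⟨le_refl _, ?_⟩, ?_⟩
    · show (j : Int) ≤ (L.length : Int)
      omega
    · show pvFinish bl ml [] (acc, cur) =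
        pvFinish bl ml (L.drop ((j : Int)).toNat) (acc ++ [PySem.Str.strip (PySem.Str.join " " cur)], [])
      rw [hjn]
      simp only [Int.toNat_natCast, List.drop_length]
      simp [pvFinish, hne]
  | cons y ys ih =>
    intro cur acc j hxs hj hne hlen hm
    have hjn : j < L.length := by
      by_contra hcon
      rw [List.drop_eq_nil_of_le (by omega)] at hxs
      exact absurd hxs (by simp)
    have h0 : L[j]? = some y := by
      have h1 := congrArg (fun l => l[0]?) hxs
      simpa using h1.symm
    have hy : PySem.List.pyGetD L (j : Int) "" = y := by
      rw [PySem.List.pyGetD_natCast]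
      simp [List.getD_eq_getElem?_getD, h0]
    have hstep : pvInnerA L ml (PySem.Str.join " " cur) (j : Int) =
        pvInnerA L ml (PySem.Str.join " " (cur ++ [y])) ((j + 1 : Nat) : Int) := by
      rw [pvInnerA]
      rw [dif_pos ⟨hm, by rw [PySem.List.len_eq]; exact_mod_cast hjn⟩]
      rw [hy, ← pv_join_append_singleton y cur hne]
      norm_cast
    have hys : ys = L.drop (j + 1) := by
      have := congrArg List.tail hxs
      simpa [List.tail_drop] using this
    by_cases hm2 : ml ≤ PySem.Str.len (PySem.Str.replace (PySem.Str.join " " (cur ++ [y])) "\n" "")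
    · -- B flushes here; A's inner loop stops at the next test
      have hstop : pvInnerA L ml (PySem.Str.join " " (cur ++ [y])) ((j + 1 : Nat) : Int) =
          (PySem.Str.join " " (cur ++ [y]), ((j + 1 : Nat) : Int)) := by
        rw [pvInnerA, dif_neg]
        rintro ⟨hc, -⟩
        omega
      rw [hstep, hstop]
      refine ⟨⟨?_, ?_⟩, ?_⟩
      · show (j : Int) ≤ ((j + 1 : Nat) : Int)
        omega
      · show ((j + 1 : Nat) : Int) ≤ (L.length : Int)
        omega
      · show pvFinish bl ml (y :: ys) (acc, cur) =
          pvFinish bl ml (L.drop (((j + 1 : Nat) : Int)).toNat)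
            (acc ++ [PySem.Str.strip (PySem.Str.join " " (cur ++ [y]))], [])
        rw [pv_finish_cons]
        rw [show pvStepB bl ml (acc, cur) y =
            (acc ++ [PySem.Str.strip (PySem.Str.join " " (cur ++ [y]))], []) from by
          simp only [pvStepB]
          rw [if_pos]
          refine ⟨?_, hm2⟩
          rw [hb]
          simp only [List.length_append, List.length_cons, List.length_nil]
          omega]
        rw [show (((j + 1 : Nat) : Int)).toNat = j + 1 from Int.toNat_natCast _, ← hys]
    · -- neither flushes; both continue with the longer buffer
      push_neg at hm2
      have hrec := ih (cur ++ [y]) acc (j + 1) hys (by omega) (by simp)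
        (by simp only [List.length_append, List.length_cons, List.length_nil]; omega) hm2
      rw [hstep]
      refine ⟨⟨?_, hrec.1.2⟩, ?_⟩
      · calc ((j : Nat) : Int) ≤ ((j + 1 : Nat) : Int) := by omega
          _ ≤ _ := hrec.1.1
      · rw [pv_finish_cons]
        rw [show pvStepB bl ml (acc, cur) y = (acc, cur ++ [y]) from by
          simp only [pvStepB]
          rw [if_neg]
          rintro ⟨-, hc⟩
          omega]
        exact hrec.2

-- the outer loop: each iteration produces one chunk, equal to what B's flat pass flushes
theorem pv_main (bl ml : Int) (b : Nat) (hb : bl = (b : Int)) (hb1 : 1 ≤ b) (L : List String) :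
    ∀ (fuel : Nat) (k : Nat) (acc : List String), k ≤ L.length → L.length - k < fuel →
    pvOuterA L bl ml fuel (k : Int) acc = pvFinish bl ml (L.drop k) (acc, []) := by
  intro fuel
  induction fuel with
  | zero => intro k acc _ h; omega
  | succ fuel ih =>
    intro k acc hk hfuel
    by_cases hkn : k < L.length
    · -- one outer iteration
      have hrest : L.drop k ≠ [] := by
        intro hcon
        have := congrArg List.length hcon
        simp only [List.length_drop, List.length_nil] at this
        omega
      have hslice : PySem.List.slice L (some (k : Int)) (some ((k : Int) + bl)) =
          (L.drop k).take b := by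
        rw [hb]; exact PySem.List.slice_natCast_add L k b
      have hguard : ((k : Int) < PySem.List.len L) := by
        rw [PySem.List.len_eq]; exact_mod_cast hkn
      rw [show pvOuterA L bl ml (fuel + 1) (k : Int) acc =
          pvOuterA L bl ml fuel
            (pvInnerA L ml (PySem.Str.join " " ((L.drop k).take b)) ((k : Int) + bl)).2
            (acc ++ [PySem.Str.strip
              (pvInnerA L ml (PySem.Str.join " " ((L.drop k).take b)) ((k : Int) + bl)).1]) from by
        simp only [pvOuterA, if_pos hguard, hslice]]
      have hcast : (k : Int) + bl = ((k + b : Nat) : Int) := by rw [hb]; push_cast; ring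
      rw [hcast]
      by_cases hshort : L.length - k < b
      · -- tail chunk: fewer than base_line lines remain
        have htake : (L.drop k).take b = L.drop k :=
          List.take_of_length_le (by simp only [List.length_drop]; omega)
        have hstop : pvInnerA L ml (PySem.Str.join " " (L.drop k)) ((k + b : Nat) : Int) =
            (PySem.Str.join " " (L.drop k), ((k + b : Nat) : Int)) := by
          rw [pvInnerA, dif_neg]
          rintro ⟨-, hc⟩
          rw [PySem.List.len_eq] at hc
          omega
        rw [htake, hstop]
        obtain ⟨fuel', rfl⟩ : ∃ f, fuel = f + 1 := ⟨fuel - 1, by omega⟩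
        have hng : ¬ (((k + b : Nat) : Int) < PySem.List.len L) := by
          rw [PySem.List.len_eq]
          push_neg
          exact_mod_cast (by omega : L.length ≤ k + b)
        rw [show pvOuterA L bl ml (fuel' + 1) ((k + b : Nat) : Int)
            (acc ++ [PySem.Str.strip (PySem.Str.join " " (L.drop k))]) =
            acc ++ [PySem.Str.strip (PySem.Str.join " " (L.drop k))] from by
          simp only [pvOuterA, if_neg hng]]
        unfold pvFinish
        rw [pv_fill_short bl ml b hb (L.drop k) [] acc
          (by simp only [List.length_nil, List.length_drop]; omega)]
        simp [hrest]
      · -- a full base chunk of b lines, then the extension phase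
        push_neg at hshort
        set cur0 : List String := (L.drop k).take b with hcur0
        have hcur0len : cur0.length = b := by
          simp only [hcur0, List.length_take, List.length_drop]; omega
        have hcur0ne : cur0 ≠ [] := by
          intro hcon
          rw [hcon] at hcur0len
          simp only [List.length_nil] at hcur0len
          omega
        have hzs : (L.drop k).drop b = L.drop (k + b) := by
          rw [List.drop_drop]
        have hsplit : L.drop k = cur0 ++ L.drop (k + b) := by
          rw [← hzs, hcur0]; exact (List.take_append_drop b (L.drop k)).symm
        have hfin : pvFinish bl ml (L.drop k) (acc, []) =
            if ml ≤ PySem.Str.len (PySem.Str.replace (PySem.Str.join " " cur0) "\n" "") then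
              pvFinish bl ml (L.drop (k + b))
                (acc ++ [PySem.Str.strip (PySem.Str.join " " cur0)], [])
            else
              pvFinish bl ml (L.drop (k + b)) (acc, cur0) := by
          unfold pvFinish
          rw [hsplit]
          rw [pv_fill bl ml b hb cur0 [] (by simpa using hb1) (by simpa using hcur0len)
            (L.drop (k + b)) acc]
          simp only [List.nil_append]
          split_ifs <;> rfl
        rw [hfin]
        by_cases hm : ml ≤ PySem.Str.len (PySem.Str.replace (PySem.Str.join " " cur0) "\n" "")
        · -- the base chunk is already long enough: inner loop does not run
          have hstop : pvInnerA L ml (PySem.Str.join " " cur0) ((k + b : Nat) : Int) =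
              (PySem.Str.join " " cur0, ((k + b : Nat) : Int)) := by
            rw [pvInnerA, dif_neg]
            rintro ⟨hc, -⟩
            omega
          rw [hstop, if_pos hm]
          exact ih (k + b) _ (by omega) (by omega)
        · push_neg at hm
          have hext := pv_ext bl ml b hb L (L.drop (k + b)) cur0 acc (k + b) rfl
            (by omega) hcur0ne (le_of_eq hcur0len.symm) hm
          rw [if_neg (by push_neg; exact hm)]
          set p := pvInnerA L ml (PySem.Str.join " " cur0) ((k + b : Nat) : Int) with hp
          obtain ⟨⟨hple, hpub⟩, heq⟩ := hext
          have hp2 : p.2 = ((p.2.toNat : Nat) : Int) := by omega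
          have h3 : pvOuterA L bl ml fuel p.2 (acc ++ [PySem.Str.strip p.1]) =
              pvFinish bl ml (L.drop p.2.toNat) (acc ++ [PySem.Str.strip p.1], []) := by
            rw [hp2]
            simp only [Int.toNat_natCast]
            exact ih p.2.toNat _ (by omega) (by omega)
          rw [heq]
          exact h3
    · -- i >= len(lyrics_list): the outer loop is over
      have hng : ¬ ((k : Int) < PySem.List.len L) := by
        rw [PySem.List.len_eq]
        push_neg
        exact_mod_cast (by omega : L.length ≤ k)
      rw [show pvOuterA L bl ml (fuel + 1) (k : Int) acc = acc from by
        simp only [pvOuterA, if_neg hng]]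
      rw [show k = L.length from by omega, List.drop_length]
      simp [pvFinish]

-- ===== VERDICT (by name: the statement is the Claim_ definition above) =====
theorem group_lyrics_by_length_py_spec : Claim_equal_group_lyrics_by_length_py := by
  intro L bl ml _ hpre
  unfold Spec_group_lyrics_by_length_py
  have hpre' : (1 : Int) ≤ bl := hpre
  have hb : bl = ((bl.toNat : Nat) : Int) := by omega
  rw [pv_alt_eq_finish]
  unfold group_lyrics_by_length_py
  have := pv_main bl ml bl.toNat hb (by omega) L (L.length + 1) 0 [] (by omega) (by omega)
  simpa using this
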